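-- pv_equiv track=rewrite | github.com/Justinabox/Callstack | callstack/sms/pdu.py | encode_phone_number
-- ===== SOURCE A (Python) =====
-- def encode_phone_number(number: str) -> tuple[str, int]:
--     """Encode a phone number for PDU.
--
--     Returns (encoded_hex, type_of_address).
--     """
--     if number.startswith("+"):
--         toa = 0x91  # International
--         number = number[1:]
--     else:
--         toa = 0x81  # Unknown/national
--
--     # Pad with F if odd length, then swap nibbles
--     if len(number) % 2:
--         number += "F"
--
--     encoded = ""
--     for i in range(0, len(number), 2):
--         encoded += number[i + 1] + number[i]
--
--     return encoded, toa
-- ===== SOURCE B (Python) =====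
-- def encode_phone_number(number: str) -> tuple[str, int]:
--     """Encode a phone number for PDU.
--
--     Returns (encoded_hex, type_of_address).
--     """
--     toa = 0x91 if number.startswith("+") else 0x81
--     digits = number.removeprefix("+")
--     if len(digits) % 2:
--         digits += "F"
--     it = iter(digits)
--     return "".join(b + a for a, b in zip(it, it)), toa
-- ===== Notes on version B (the rewrite author's own statement) =====
-- stated objective: idiomatic
-- what changed: Replaces A's index loop over range(0, len, 2) with string concatenation by a pairwise zip over a single iterator (zip(it, it)) joined in one pass, removing all indexing.
import Mathlib
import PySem

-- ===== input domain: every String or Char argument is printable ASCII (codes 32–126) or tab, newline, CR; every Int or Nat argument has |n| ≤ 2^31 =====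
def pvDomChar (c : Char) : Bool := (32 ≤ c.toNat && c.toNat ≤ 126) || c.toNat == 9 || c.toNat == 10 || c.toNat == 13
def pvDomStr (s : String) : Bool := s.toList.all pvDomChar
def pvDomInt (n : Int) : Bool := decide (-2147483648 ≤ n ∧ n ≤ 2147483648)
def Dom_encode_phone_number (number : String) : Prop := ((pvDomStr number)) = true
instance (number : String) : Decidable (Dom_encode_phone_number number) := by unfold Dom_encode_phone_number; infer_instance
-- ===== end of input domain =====

-- B replaces A's index loop over range(0, len, 2) with pairwise consumption of the
-- digits (zip(it, it)) — an idiomatic, index-free traversal of the same data.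

-- ===== PORT A =====
-- A, step for step: strip '+' (toa 0x91/0x81), pad to even length with 'F',
-- then loop i over range(0, len, 2) appending number[i+1] + number[i].
-- The pyGetD default is never used: every index i, i+1 is in range after padding.
def encode_phone_number (number : String) : String × Int :=
  let st := if PySem.Str.startswith number "+" then
      ((0x91 : Int), PySem.List.slice number.toList (some 1) none)
    else ((0x81 : Int), number.toList)
  let num := if st.2.length % 2 = 1 then st.2 ++ ['F'] else st.2
  let encoded := (PySem.List.pyRange 0 num.length 2).foldl
    (fun acc i => acc ++ [PySem.List.pyGetD num (i + 1) ' ', PySem.List.pyGetD num i ' ']) []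
  (String.ofList encoded, st.1)

-- ===== PORT B =====
-- 'zip(it, it)' over the same iterator pairs consecutive characters (a, b) and
-- ''.join(b + a …) emits them swapped; dropping an unpaired leftover is zip's rule.
def pvSwapPairs : List Char → List Char
  | [] => []
  | [_] => []
  | a :: b :: rest => b :: a :: pvSwapPairs rest

def encode_phone_number_alt (number : String) : String × Int :=
  let toa : Int := if PySem.Str.startswith number "+" then 0x91 else 0x81
  let digits := if PySem.Str.startswith number "+" then number.toList.drop 1 else number.toList
  let digits := if digits.length % 2 = 1 then digits ++ ['F'] else digits
  (String.ofList (pvSwapPairs digits), toa)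

-- ===== PRECONDITION & SPEC =====
def Spec_encode_phone_number (number : String) (out : String × Int) : Prop := out = encode_phone_number_alt number
instance (number : String) (out : String × Int) : Decidable (Spec_encode_phone_number number out) := by unfold Spec_encode_phone_number; infer_instance

-- ===== CLAIM (what is proved, stated in full; the proofs are below) =====
def Claim_equal_encode_phone_number : Prop := ∀ (number : String), Dom_encode_phone_number number → Spec_encode_phone_number number (encode_phone_number number)

-- ===== LEMMAS AND PROOFS =====

-- The core of A's loop, rephrased over List.range, equals pvSwapPairs on even-length lists.
lemma pv_range_flatMap_eq_swapPairs (cs : List Char) (h : cs.length % 2 = 0) :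
    (List.range (cs.length / 2)).flatMap
      (fun k => [cs.getD (2 * k + 1) ' ', cs.getD (2 * k) ' ']) = pvSwapPairs cs := by
  induction cs using pvSwapPairs.induct with
  | case1 => simp [pvSwapPairs]
  | case2 a => simp at h
  | case3 a b rest ih =>
    have hr : rest.length % 2 = 0 := by simp [List.length_cons] at h; omega
    have hlen : (a :: b :: rest).length / 2 = rest.length / 2 + 1 := by
      simp [List.length_cons]; omega
    rw [hlen, List.range_succ_eq_map]
    simp only [List.flatMap_cons, List.flatMap_map]
    have hstep : (fun k => [(a :: b :: rest).getD (2 * Nat.succ k + 1) ' ',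
        (a :: b :: rest).getD (2 * Nat.succ k) ' '])
        = fun k => [rest.getD (2 * k + 1) ' ', rest.getD (2 * k) ' '] := by
      funext k
      have h1 : 2 * Nat.succ k + 1 = 2 * k + 1 + 1 + 1 := by omega
      have h2 : 2 * Nat.succ k = 2 * k + 1 + 1 := by omega
      rw [h1, h2, List.getD_cons_succ, List.getD_cons_succ, List.getD_cons_succ,
        List.getD_cons_succ]
    rw [hstep, ih hr]
    simp [pvSwapPairs, List.getD]

-- A's index loop over pyRange 0 len 2 computes pvSwapPairs on even-length lists.
lemma pv_loopA_eq_swapPairs (cs : List Char) (h : cs.length % 2 = 0) :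
    (PySem.List.pyRange 0 cs.length 2).foldl
      (fun acc i => acc ++ [PySem.List.pyGetD cs (i + 1) ' ', PySem.List.pyGetD cs i ' ']) []
      = pvSwapPairs cs := by
  rw [PySem.List.foldl_append_eq_flatMap, List.nil_append,
    PySem.List.pyRange_of_pos 0 cs.length (by norm_num), List.flatMap_map]
  have hcount : (if (0 : Int) < cs.length then
      (((cs.length : Int) - 0 + 2 - 1) / 2).toNat else 0) = cs.length / 2 := by
    split_ifs with hpos <;> omega
  rw [hcount]
  have hfun : (fun a : Nat => [PySem.List.pyGetD cs (0 + 2 * (a : Int) + 1) ' ',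
      PySem.List.pyGetD cs (0 + 2 * (a : Int)) ' '])
      = fun k => [cs.getD (2 * k + 1) ' ', cs.getD (2 * k) ' '] := by
    funext k
    have h1 : (0 : Int) + 2 * (k : Int) + 1 = ((2 * k + 1 : Nat) : Int) := by push_cast; ring
    have h2 : (0 : Int) + 2 * (k : Int) = ((2 * k : Nat) : Int) := by push_cast; ring
    rw [h1, h2, PySem.List.pyGetD_natCast, PySem.List.pyGetD_natCast]
  rw [hfun, pv_range_flatMap_eq_swapPairs cs h]

lemma pv_pad_even (l : List Char) :
    (if l.length % 2 = 1 then l ++ ['F'] else l).length % 2 = 0 := by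
  split_ifs with h
  · simp only [List.length_append, List.length_cons, List.length_nil]; omega
  · omega

-- ===== VERDICT (by name: the statement is the Claim_ definition above) =====
theorem encode_phone_number_spec : Claim_equal_encode_phone_number := by
  intro number _
  show encode_phone_number number = encode_phone_number_alt number
  unfold encode_phone_number encode_phone_number_alt
  rw [PySem.List.slice_from_one, List.drop_one]
  by_cases h : PySem.Str.startswith number "+" = true
  · simp only [h, if_true]
    exact congrArg₂ Prod.mk
      (congrArg String.ofList (pv_loopA_eq_swapPairs _ (pv_pad_even _))) rfl
  · simp only [h, if_false, Bool.false_eq_true]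
    exact congrArg₂ Prod.mk
      (congrArg String.ofList (pv_loopA_eq_swapPairs _ (pv_pad_even _))) rfl
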